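-- pv_equiv track=rewrite | github.com/DanieleSavino/Progettazione_di_Algoritmi | generate_readme.py | generate_codes
-- ===== SOURCE A (Python) =====
-- def generate_codes(lines: list[str]) -> list[str]:
--     codes = []
--
--     latest_def = None
--     for i in range(1, len(lines)):
--         line = lines[i].strip()
--         if line.startswith('def'):
--             if latest_def is None:
--                 latest_def = i
--                 continue
--
--             codes.append([l for l in lines[latest_def:i]])
--             latest_def = i
--
--     codes.append(lines[latest_def:])
--
--     for code in codes:
--         for i in range(len(code)-1, -1, -1):
--             line = code[i]
--             if line == '\n':
--                 code.pop(i)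
--             else:
--                 break
--
--     return codes
-- ===== SOURCE B (Python) =====
-- def generate_codes(lines: list[str]) -> list[str]:
--     # collect indices (from 1 on, as in A) of lines whose stripped text starts with 'def'
--     idx = [i for i in range(1, len(lines)) if lines[i].strip().startswith('def')]
--     if not idx:
--         blocks = [lines[:]]
--     else:
--         blocks = [lines[a:b] for a, b in zip(idx, idx[1:])]
--         blocks.append(lines[idx[-1]:])
--     return [_rtrim(b) for b in blocks]
--
-- def _rtrim(block):
--     if block and block[-1] == '\n':
--         return _rtrim(block[:-1])
--     return block
-- ===== Notes on version B (the rewrite author's own statement) =====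
-- stated objective: simpler
-- what changed: B replaces A's single stateful loop (latest_def tracking with appends mid-loop) by a scan that collects all def-line indices, then builds blocks by slicing consecutive index pairs, and replaces the in-place tail-popping loop by a recursive right trim.
import Mathlib
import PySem

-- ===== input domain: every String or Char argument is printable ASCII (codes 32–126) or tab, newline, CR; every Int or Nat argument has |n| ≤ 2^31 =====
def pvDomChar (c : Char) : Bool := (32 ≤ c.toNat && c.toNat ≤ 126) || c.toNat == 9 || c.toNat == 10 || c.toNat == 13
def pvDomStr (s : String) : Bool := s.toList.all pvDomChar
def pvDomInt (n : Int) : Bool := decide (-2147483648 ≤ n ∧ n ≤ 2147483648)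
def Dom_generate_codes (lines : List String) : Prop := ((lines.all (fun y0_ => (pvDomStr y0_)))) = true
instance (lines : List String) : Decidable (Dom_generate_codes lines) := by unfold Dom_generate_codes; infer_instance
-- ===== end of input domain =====

-- B replaces A's stateful fold (latest_def tracking + append inside the loop) by one index
-- scan followed by pairwise slicing, and A's in-place tail-popping loop by a recursive
-- right trim (objective: simpler decomposition, same cost).

-- ===== PORT A =====
-- one iteration of A's 'for i in range(1, len(lines))' loop body
def gcStepA (lines : List String) (st : List (List String) × Option Int) (i : Int) :
    List (List String) × Option Int :=
  if PySem.Str.startswith (PySem.Str.strip (PySem.List.pyGetD lines i "")) "def" then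
    match st.2 with
    | none => (st.1, some i)
    | some ld => (st.1 ++ [PySem.List.slice lines (some ld) (some i)], some i)
  else st

-- A's trimming loop: 'for i in range(len(code)-1, -1, -1): … code.pop(i) … else break'
def gcTrimA (code : List String) (i : Int) : List String :=
  if _h : i < 0 then code
  else
    match PySem.List.pyGet? code i with
    | none => code
    | some line =>
      if line == "\n" then
        gcTrimA (((PySem.List.pop? code i).map Prod.snd).getD code) (i - 1)
      else code
termination_by (i + 1).toNat
decreasing_by simp at _h; omega

def generate_codes (lines : List String) : List (List String) :=
  let st := (PySem.List.pyRange 1 (lines.length : Int) 1).foldl (gcStepA lines) ([], none)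
  let codes := st.1 ++ [PySem.List.slice lines st.2 none]
  codes.map (fun code => gcTrimA code ((code.length : Int) - 1))

-- ===== PORT B =====
-- B's _rtrim: recursive right-trim of trailing "\n" lines
def gcRtrim (block : List String) : List String :=
  if block ≠ [] ∧ PySem.List.pyGet? block (-1) = some "\n" then
    gcRtrim (PySem.List.slice block none (some (-1)))
  else block
termination_by block.length
decreasing_by
  rename_i h
  simp [PySem.List.slice_to_neg_one]
  exact List.length_pos_of_ne_nil h.1

def generate_codes_alt (lines : List String) : List (List String) :=
  let idx := (PySem.List.pyRange 1 (lines.length : Int) 1).filter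
    (fun i => PySem.Str.startswith (PySem.Str.strip (PySem.List.pyGetD lines i "")) "def")
  let blocks :=
    if idx = [] then [PySem.List.slice lines none none]
    else
      ((idx.zip (PySem.List.slice idx (some 1) none)).map
        (fun p => PySem.List.slice lines (some p.1) (some p.2)))
      ++ [PySem.List.slice lines (some (PySem.List.pyGetD idx (-1) 0)) none]
  blocks.map gcRtrim

-- ===== PRECONDITION & SPEC =====
def Spec_generate_codes (lines : List String) (out : List (List String)) : Prop := out = generate_codes_alt lines
instance (lines : List String) (out : List (List String)) : Decidable (Spec_generate_codes lines out) := by unfold Spec_generate_codes; infer_instance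

-- ===== CLAIM (what is proved, stated in full; the proofs are below) =====
def Claim_equal_generate_codes : Prop := ∀ (lines : List String), Dom_generate_codes lines → Spec_generate_codes lines (generate_codes lines)

-- ===== LEMMAS AND PROOFS =====

-- the two trims agree
theorem gcTrim_eq (code : List String) :
    gcTrimA code ((code.length : Int) - 1) = gcRtrim code := by
  induction code using gcRtrim.induct with
  | case1 block h ih =>
    obtain ⟨hne, hlast⟩ := h
    have hlen : 0 < block.length := List.length_pos_of_ne_nil hne
    rw [gcTrimA, gcRtrim, if_pos ⟨hne, hlast⟩]
    have hi : ((block.length : Int) - 1) = ((block.length - 1 : Nat) : Int) := by omega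
    have hget : PySem.List.pyGet? block ((block.length : Int) - 1) = some "\n" := by
      rw [hi, PySem.List.pyGet?_natCast, ← List.getLast?_eq_getElem?]
      rwa [PySem.List.pyGet?_neg_one] at hlast
    have hpop : PySem.List.pop? block ((block.length : Int) - 1) =
        some (block[block.length - 1]'(by omega), block.eraseIdx (block.length - 1)) := by
      rw [hi]; exact PySem.List.pop?_natCast block (block.length - 1) (by omega)
    rw [dif_neg (by omega : ¬ ((block.length : Int) - 1 < 0)), hget, hpop]
    simp only [beq_self_eq_true, if_pos]
    have hdl : block.eraseIdx (block.length - 1) = block.dropLast :=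
      (List.dropLast_eq_eraseIdx (by omega)).symm
    have hslice : PySem.List.slice block none (some (-1)) = block.dropLast :=
      PySem.List.slice_to_neg_one block
    rw [hslice] at ih ⊢
    simp only [Option.map_some, Option.getD_some, hdl]
    have hlen2 : ((block.dropLast.length : Int) - 1) = (block.length : Int) - 1 - 1 := by
      simp [List.length_dropLast]; omega
    rw [← hlen2]
    exact ih
  | case2 block h =>
    rw [gcRtrim, if_neg h, gcTrimA]
    by_cases hne : block = []
    · subst hne; simp
    · have hlen : 0 < block.length := List.length_pos_of_ne_nil hne
      have hi : ((block.length : Int) - 1) = ((block.length - 1 : Nat) : Int) := by omega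
      have hl : block.getLast? ≠ some "\n" := by
        intro hc
        exact h ⟨hne, by rwa [PySem.List.pyGet?_neg_one]⟩
      have hget : PySem.List.pyGet? block ((block.length : Int) - 1) = block.getLast? := by
        rw [hi, PySem.List.pyGet?_natCast, ← List.getLast?_eq_getElem?]
      rcases hg : block.getLast? with _ | v
      · simp [List.getLast?_eq_none_iff] at hg; exact absurd hg hne
      · rw [hget, hg]
        rw [dif_neg (by omega : ¬ ((block.length : Int) - 1 < 0))]
        have : (v == "\n") = false := by rw [hg] at hl; simp_all
        simp [this]

-- A's fold once a first def-index has been latched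
theorem gcFold_some (lines : List String) (l : List Int) (codes : List (List String)) (a : Int) :
    l.foldl (gcStepA lines) (codes, some a) =
      (codes ++ (((a :: l.filter (fun i => PySem.Str.startswith (PySem.Str.strip (PySem.List.pyGetD lines i "")) "def")).zip
          (l.filter (fun i => PySem.Str.startswith (PySem.Str.strip (PySem.List.pyGetD lines i "")) "def"))).map
        (fun p => PySem.List.slice lines (some p.1) (some p.2))),
       (a :: l.filter (fun i => PySem.Str.startswith (PySem.Str.strip (PySem.List.pyGetD lines i "")) "def")).getLast?) := by
  induction l generalizing codes a with
  | nil => simp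
  | cons c l ih =>
    rw [List.foldl_cons]
    by_cases hp : PySem.Str.startswith (PySem.Str.strip (PySem.List.pyGetD lines c "")) "def" = true
    · have hstep : gcStepA lines (codes, some a) c =
          (codes ++ [PySem.List.slice lines (some a) (some c)], some c) := by
        simp only [gcStepA, hp, if_pos]
      rw [hstep, ih]
      simp only [List.filter_cons, hp, if_true]
      refine Prod.ext ?_ ?_
      · simp [List.append_assoc]
      · simp [List.getLast?_cons_cons]
    · have hstep : gcStepA lines (codes, some a) c = (codes, some a) := by
        simp only [gcStepA, hp]
        simp
      rw [hstep, ih]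
      simp only [List.filter_cons, hp, Bool.false_eq_true, if_false]

-- A's fold from the initial state, characterised by the filtered index list
theorem gcFold_none (lines : List String) (l : List Int) :
    l.foldl (gcStepA lines) ([], none) =
      (match l.filter (fun i => PySem.Str.startswith (PySem.Str.strip (PySem.List.pyGetD lines i "")) "def") with
       | [] => (([] : List (List String)), (none : Option Int))
       | b :: r => (((b :: r).zip r).map (fun p => PySem.List.slice lines (some p.1) (some p.2)),
                    (b :: r).getLast?)) := by
  induction l with
  | nil => simp
  | cons c l ih =>
    rw [List.foldl_cons]
    by_cases hp : PySem.Str.startswith (PySem.Str.strip (PySem.List.pyGetD lines c "")) "def" = true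
    · have hstep : gcStepA lines ([], none) c = ([], some c) := by
        simp only [gcStepA, hp, if_pos]
      rw [hstep, gcFold_some]
      simp only [List.filter_cons, hp, if_true]
      simp
    · have hstep : gcStepA lines ([], none) c = ([], none) := by
        simp only [gcStepA, hp]
        simp
      rw [hstep, ih]
      simp only [List.filter_cons, hp, Bool.false_eq_true, if_false]

-- ===== VERDICT (by name: the statement is the Claim_ definition above) =====
theorem generate_codes_spec : Claim_equal_generate_codes := by
  intro lines _
  unfold Spec_generate_codes
  simp only [generate_codes, generate_codes_alt]
  rw [gcFold_none]
  rcases hf : (PySem.List.pyRange 1 (lines.length : Int) 1).filter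
      (fun i => PySem.Str.startswith (PySem.Str.strip (PySem.List.pyGetD lines i "")) "def") with _ | ⟨b, r⟩
  · simp [gcTrim_eq]
  · have hne : b :: r ≠ [] := List.cons_ne_nil _ _
    simp only [hne, if_false]
    rw [PySem.List.slice_from_one, PySem.List.pyGetD_neg_one (b :: r) 0 hne,
      List.getLast?_eq_some_getLast (h := hne)]
    simp [gcTrim_eq]
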